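-- pv_equiv track=rewrite | github.com/NiaML/MCD-4710-Algorithm | week 3/workshop03.py | addition_table
-- ===== SOURCE A (Python) =====
-- def addition_table(numbers):
--     """
--     >>> addition_table([2, 5, -3, 7])
--     [[3, 6, -2, 8], [4, 7, -1, 9], [5, 8, 0, 10]]
--     >>> addition_table([1])
--     [[2], [3], [4]]
--     >>> addition_table([-2, -5, -9, -12, -23])
--     [[-1, -4, -8, -11, -22], [0, -3, -7, -10, -21], [1, -2, -6, -9, -20]]
--     """
--     new_table = []
--     for i in range(3):
--         new_table.append([])
--         for j in range(len(numbers)):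
--             new_table[i].append(numbers[j] + i+1)
--     return new_table
--     pass
-- ===== SOURCE B (Python) =====
-- def addition_table(numbers):
--     # Column-wise: build one (n+1, n+2, n+3) column per input, then transpose.
--     columns = [(n + 1, n + 2, n + 3) for n in numbers]
--     rows = zip(*columns) if columns else ((), (), ())
--     return [list(row) for row in rows]
-- ===== Notes on version B (the rewrite author's own statement) =====
-- stated objective: alternative
-- what changed: B works column-wise: it builds one (n+1,n+2,n+3) column per input number and transposes with zip(*...), instead of A's row-wise nested index loops.
import Mathlib
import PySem

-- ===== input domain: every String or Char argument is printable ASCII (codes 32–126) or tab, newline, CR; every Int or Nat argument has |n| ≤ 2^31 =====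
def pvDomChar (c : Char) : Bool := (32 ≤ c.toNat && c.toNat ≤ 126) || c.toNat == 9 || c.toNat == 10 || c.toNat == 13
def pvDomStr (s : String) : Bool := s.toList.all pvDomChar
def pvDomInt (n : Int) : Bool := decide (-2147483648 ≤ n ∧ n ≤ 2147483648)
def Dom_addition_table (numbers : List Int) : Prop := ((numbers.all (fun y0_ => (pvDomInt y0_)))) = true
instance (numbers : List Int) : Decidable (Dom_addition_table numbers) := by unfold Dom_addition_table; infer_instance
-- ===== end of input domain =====

-- B builds one (n+1,n+2,n+3) column per number and transposes, instead of A's row-wise nested loops; alternative decomposition, same values.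

-- ===== PORT A =====
-- A: outer loop i in range(3) appends a fresh row; inner loop j in range(len(numbers)) appends numbers[j]+i+1.
-- numbers[j] is always in range here; the .getD 0 default is never used.
def addition_table (numbers : List Int) : List (List Int) :=
  (PySem.List.pyRange 0 3 1).foldl
    (fun tbl i =>
      tbl ++ [(PySem.List.pyRange 0 (PySem.List.len numbers) 1).foldl
        (fun row j => row ++ [(PySem.List.pyGetD numbers j 0) + i + 1]) []])
    []

-- ===== PORT B =====
-- B: columns = [(n+1,n+2,n+3) for n in numbers]; rows = zip(*columns) (or three empty rows when
-- columns is empty); return [list(row) for row in rows]. zip(*) over triples is exactly the three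
-- projection maps, ported component-wise (exact since every column has the same length 3).
def addition_table_alt (numbers : List Int) : List (List Int) :=
  let columns : List (Int × Int × Int) := numbers.map (fun n => (n + 1, n + 2, n + 3))
  let rows : List Int × List Int × List Int :=
    (columns.map (fun c => c.1), columns.map (fun c => c.2.1), columns.map (fun c => c.2.2))
  [rows.1, rows.2.1, rows.2.2]

-- ===== PRECONDITION & SPEC =====
def Spec_addition_table (numbers : List Int) (out : List (List Int)) : Prop := out = addition_table_alt numbers
instance (numbers : List Int) (out : List (List Int)) : Decidable (Spec_addition_table numbers out) := by unfold Spec_addition_table; infer_instance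

-- ===== CLAIM (what is proved, stated in full; the proofs are below) =====
def Claim_equal_addition_table : Prop := ∀ (numbers : List Int), Dom_addition_table numbers → Spec_addition_table numbers (addition_table numbers)

-- ===== LEMMAS AND PROOFS =====
theorem addition_table_row (numbers : List Int) (i : Int) :
    (PySem.List.pyRange 0 (PySem.List.len numbers) 1).foldl
      (fun row j => row ++ [(PySem.List.pyGetD numbers j 0) + i + 1]) []
      = numbers.map (fun n => n + i + 1) := by
  rw [PySem.List.foldl_pyRange_zero_pyGetD numbers 0 (fun row v => row ++ [v + i + 1]) []]
  exact (PySem.List.foldl_append_singleton_eq_map (fun n => n + i + 1) numbers []).trans (List.nil_append _)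

theorem addition_table_eq (numbers : List Int) :
    addition_table numbers = addition_table_alt numbers := by
  unfold addition_table addition_table_alt
  simp only [show PySem.List.pyRange 0 3 1 = [0, 1, 2] from by decide,
    List.foldl_cons, List.foldl_nil, addition_table_row, List.map_map]
  simp only [List.nil_append, List.singleton_append, Function.comp_def]
  norm_num
  exact ⟨fun a _ => by ring, fun a _ => by ring⟩

-- ===== VERDICT (by name: the statement is the Claim_ definition above) =====
theorem addition_table_spec : Claim_equal_addition_table := by
  intro numbers _
  exact addition_table_eq numbers
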